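-- pv_equiv track=rewrite | github.com/c0d3-k1ra/agentic-ai-blogger | src/agents/structure_planner.py | _determine_sections
-- ===== SOURCE A (Python) =====
-- def _determine_sections(topic: str, max_sections: int) -> list[str]:
--     """Determine which sections to include based on topic and constraints.
--
--     Always includes:
--     - Introduction (first)
--     - Conclusion (last)
--
--     Middle sections selected based on:
--     - Available slots (max_sections - 2)
--     - Topic keywords
--
--     Args:
--         topic: The article topic (cleaned)
--         max_sections: Maximum total sections allowed
--
--     Returns:
--         List of section type keys in order
--
--     Examples:
--         >>> _determine_sections("Python", 3)
--         ['introduction', 'fundamentals', 'conclusion']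
--         >>> _determine_sections("Advanced Python", 5)
--         ['introduction', 'fundamentals', 'advanced', 'pitfalls', 'conclusion']
--     """
--     # Reserved sections (always included)
--     RESERVED = ["introduction", "conclusion"]
--
--     # Calculate available slots for middle content
--     available_slots = max_sections - len(RESERVED)
--
--     # Build middle sections based on available space and topic
--     middle = []
--     topic_lower = topic.lower()
--
--     # Priority 1: Fundamentals (unless severely constrained)
--     if available_slots >= 1:
--         middle.append("fundamentals")
--
--     # Priority 2: Advanced OR Practical (keyword-driven)
--     if available_slots >= 2:
--         if any(kw in topic_lower for kw in ["advanced", "deep", "expert", "mastering"]):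
--             middle.append("advanced")
--         else:
--             middle.append("practical")
--
--     # Priority 3: Pitfalls
--     if available_slots >= 3:
--         middle.append("pitfalls")
--
--     # Priority 4: Add the other (practical/advanced) if room
--     if available_slots >= 4:
--         if "advanced" in middle:
--             middle.append("practical")
--         else:
--             middle.append("advanced")
--
--     # Cap middle sections to available slots
--     middle = middle[:available_slots]
--
--     # Assemble: intro + middle + conclusion
--     return ["introduction", *middle, "conclusion"]
-- ===== SOURCE B (Python) =====
-- def _determine_sections(topic: str, max_sections: int) -> list[str]:
--     """Score-and-filter: give each middle section a priority rank (keyword hits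
--     swap 'advanced' and 'practical'), keep the sections whose rank fits in the
--     slot budget, and emit them in rank order."""
--     hit = any(kw in topic.lower() for kw in ["advanced", "deep", "expert", "mastering"])
--     rank = {
--         "fundamentals": 1,
--         "advanced": 2 if hit else 4,
--         "practical": 4 if hit else 2,
--         "pitfalls": 3,
--     }
--     slots = max_sections - 2
--     middle = sorted((s for s in rank if rank[s] <= slots), key=rank.get)
--     return ["introduction", *middle, "conclusion"]
-- ===== Notes on version B (the rewrite author's own statement) =====
-- stated objective: alternative
-- what changed: Replaces A's chain of threshold-guarded appends and trailing slice with a rank table: each section gets a priority number (keyword flag swaps advanced/practical), sections whose rank fits the slot budget are filtered out of the table and sorted by rank.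
import Mathlib
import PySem

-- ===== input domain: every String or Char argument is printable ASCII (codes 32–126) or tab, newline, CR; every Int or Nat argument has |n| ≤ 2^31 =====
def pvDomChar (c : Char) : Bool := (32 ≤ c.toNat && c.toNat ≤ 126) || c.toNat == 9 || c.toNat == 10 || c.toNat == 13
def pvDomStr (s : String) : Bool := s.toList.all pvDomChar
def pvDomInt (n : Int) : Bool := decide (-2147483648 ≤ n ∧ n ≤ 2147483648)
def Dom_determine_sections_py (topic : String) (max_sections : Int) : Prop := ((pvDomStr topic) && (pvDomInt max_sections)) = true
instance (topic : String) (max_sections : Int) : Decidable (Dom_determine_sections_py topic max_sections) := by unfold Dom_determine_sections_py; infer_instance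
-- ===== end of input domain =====

-- B replaces A's threshold-guarded append chain by a rank table filtered against the slot budget and sorted by rank (objective: alternative).

-- ===== PORT A =====
def determine_sections_py (topic : String) (max_sections : Int) : List String :=
  let available_slots : Int := max_sections - 2
  let topic_lower := PySem.Str.lower topic
  let middle : List String := []
  let middle := if available_slots ≥ 1 then middle ++ ["fundamentals"] else middle
  let middle := if available_slots ≥ 2 then
      (if (["advanced", "deep", "expert", "mastering"].any
            (fun kw => PySem.Str.isIn kw topic_lower))
       then middle ++ ["advanced"] else middle ++ ["practical"])
    else middle
  let middle := if available_slots ≥ 3 then middle ++ ["pitfalls"] else middle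
  let middle := if available_slots ≥ 4 then
      (if "advanced" ∈ middle then middle ++ ["practical"] else middle ++ ["advanced"])
    else middle
  let middle := PySem.List.slice middle none (some available_slots)
  "introduction" :: middle ++ ["conclusion"]

-- ===== PORT B =====
def determine_sections_py_alt (topic : String) (max_sections : Int) : List String :=
  let hit := ["advanced", "deep", "expert", "mastering"].any
      (fun kw => PySem.Str.isIn kw (PySem.Str.lower topic))
  let rank : PySem.Dict String Int := PySem.Dict.ofList
      [("fundamentals", 1), ("advanced", if hit then 2 else 4),
       ("practical", if hit then 4 else 2), ("pitfalls", 3)]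
  let slots := max_sections - 2
  let middle := PySem.List.sorted
      (rank.keys.filter (fun s => rank.getD s 0 ≤ slots))
      (fun s => rank.getD s 0) false
  "introduction" :: middle ++ ["conclusion"]

-- ===== PRECONDITION & SPEC =====
def Spec_determine_sections_py (topic : String) (max_sections : Int) (out : List String) : Prop := out = determine_sections_py_alt topic max_sections
instance (topic : String) (max_sections : Int) (out : List String) : Decidable (Spec_determine_sections_py topic max_sections out) := by unfold Spec_determine_sections_py; infer_instance

-- ===== CLAIM =====
def Claim_equal_determine_sections_py : Prop := ∀ (topic : String) (max_sections : Int), Dom_determine_sections_py topic max_sections → Spec_determine_sections_py topic max_sections (determine_sections_py topic max_sections)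

-- ===== LEMMAS AND PROOFS =====

-- ===== VERDICT =====
theorem determine_sections_py_spec : Claim_equal_determine_sections_py := by
  intro topic m _
  unfold Spec_determine_sections_py determine_sections_py determine_sections_py_alt
  have hd : ∀ (a b c d : Int),
      PySem.Dict.ofList [("fundamentals", a), ("advanced", b), ("practical", c), ("pitfalls", d)]
        = PySem.Dict.mk [("fundamentals", a), ("advanced", b), ("practical", c), ("pitfalls", d)] := by
    intro a b c d; rfl
  rcases hb : (["advanced", "deep", "expert", "mastering"].any
      (fun kw => PySem.Str.isIn kw (PySem.Str.lower topic))) with _ | _ <;>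
    simp only [hb, reduceIte, hd, PySem.Dict.keys_mk] <;>
    [skip; skip] <;>
  · rcases (by omega : m ≤ 2 ∨ m = 3 ∨ m = 4 ∨ m = 5 ∨ 6 ≤ m) with h | h | h | h | h
    · simp only [ge_iff_le,
        if_neg (show ¬((1:Int) ≤ m - 2) from by omega),
        if_neg (show ¬((2:Int) ≤ m - 2) from by omega),
        if_neg (show ¬((3:Int) ≤ m - 2) from by omega),
        if_neg (show ¬((4:Int) ≤ m - 2) from by omega)]
      simp [List.filter, PySem.Dict.getD, PySem.Dict.get?_mk_cons, PySem.List.sorted, PySem.List.slice,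
        show ¬((1:Int) ≤ m - 2) from by omega, show ¬((2:Int) ≤ m - 2) from by omega,
        show ¬((3:Int) ≤ m - 2) from by omega, show ¬((4:Int) ≤ m - 2) from by omega]
    · subst h; decide
    · subst h; decide
    · subst h; decide
    · have c1 : (1:Int) ≤ m - 2 := by omega
      have c2 : (2:Int) ≤ m - 2 := by omega
      have c3 : (3:Int) ≤ m - 2 := by omega
      have c4 : (4:Int) ≤ m - 2 := by omega
      obtain ⟨n, hn, hn4⟩ : ∃ n : Nat, m - 2 = (n : Int) ∧ 4 ≤ n :=
        ⟨(m - 2).toNat, by omega, by omega⟩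
      simp only [ge_iff_le, if_pos c1, if_pos c2, if_pos c3, if_pos c4]
      rw [hn, PySem.List.slice_to_natCast]
      simp [List.filter, PySem.Dict.getD, PySem.Dict.get?_mk_cons, PySem.List.sorted, PySem.List.insertBy,
        List.take_of_length_le, hn4,
        show ((1:Int) ≤ (n:Int)) from by omega, show ((2:Int) ≤ (n:Int)) from by omega,
        show ((3:Int) ≤ (n:Int)) from by omega, show ((4:Int) ≤ (n:Int)) from by omega]
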